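-- pv_equiv track=rewrite | github.com/MajoorWaldi/ComfyUI-Majoor-AssetsManager | mjr_am_backend/features/metadata/service.py | _classify_media_nodes
-- ===== SOURCE A (Python) =====
-- def _classify_media_nodes(types: list[str]) -> tuple[bool, bool, bool]:
--     has_load = any("loadvideo" in token or "vhs_loadvideo" in token for token in types)
--     has_combine = any("videocombine" in token or "video_combine" in token or "vhs_videocombine" in token for token in types)
--     has_save = any(
--         token.startswith("save") or "savevideo" in token or "savegif" in token or "saveanimatedwebp" in token
--         for token in types
--     )
--     return has_load, has_combine, has_save
-- ===== SOURCE B (Python) =====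
-- def _classify_media_nodes(types: list[str]) -> tuple[bool, bool, bool]:
--     has_load = has_combine = has_save = False
--     for token in types:
--         if not has_load and ("loadvideo" in token or "vhs_loadvideo" in token):
--             has_load = True
--         if not has_combine and ("videocombine" in token or "video_combine" in token or "vhs_videocombine" in token):
--             has_combine = True
--         if not has_save and (token.startswith("save") or "savevideo" in token or "savegif" in token or "saveanimatedwebp" in token):
--             has_save = True
--         if has_load and has_combine and has_save:
--             break
--     return has_load, has_combine, has_save
-- ===== Notes on version B (the rewrite author's own statement) =====
-- stated objective: alternative
-- what changed: Replaces three separate any(...) scans of the list by a single stateful pass that maintains three flags and stops early once all three are set.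
import Mathlib
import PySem

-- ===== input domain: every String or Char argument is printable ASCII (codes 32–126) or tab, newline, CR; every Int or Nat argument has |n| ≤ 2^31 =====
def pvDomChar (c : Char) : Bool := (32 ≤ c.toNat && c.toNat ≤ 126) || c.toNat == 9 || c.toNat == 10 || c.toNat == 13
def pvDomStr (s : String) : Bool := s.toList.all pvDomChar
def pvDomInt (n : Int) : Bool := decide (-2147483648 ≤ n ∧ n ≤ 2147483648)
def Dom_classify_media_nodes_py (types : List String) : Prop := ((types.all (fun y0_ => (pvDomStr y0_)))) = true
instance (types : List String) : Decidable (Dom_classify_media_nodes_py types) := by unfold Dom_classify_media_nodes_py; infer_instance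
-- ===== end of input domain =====

-- B replaces A's three separate any(...) scans by a single stateful pass with three flags and an
-- early break; same return value on every input (objective: alternative).


-- shared token tests (the literal per-token conditions of the Python source)
def isLoadTok (token : String) : Bool :=
  PySem.Str.isIn "loadvideo" token || PySem.Str.isIn "vhs_loadvideo" token
def isCombineTok (token : String) : Bool :=
  PySem.Str.isIn "videocombine" token || PySem.Str.isIn "video_combine" token ||
    PySem.Str.isIn "vhs_videocombine" token
def isSaveTok (token : String) : Bool :=
  PySem.Str.startswith token "save" || PySem.Str.isIn "savevideo" token ||
    PySem.Str.isIn "savegif" token || PySem.Str.isIn "saveanimatedwebp" token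

-- ===== PORT A =====
def classify_media_nodes_py (types : List String) : Bool × Bool × Bool :=
  let has_load := types.any (fun token => isLoadTok token)
  let has_combine := types.any (fun token => isCombineTok token)
  let has_save := types.any (fun token => isSaveTok token)
  (has_load, has_combine, has_save)

-- ===== PORT B =====
-- single pass: three accumulated flags, early break once all three are set
def classifyLoop : List String → Bool → Bool → Bool → Bool × Bool × Bool
  | [], has_load, has_combine, has_save => (has_load, has_combine, has_save)
  | token :: rest, has_load, has_combine, has_save =>
    let has_load := if !has_load && isLoadTok token then true else has_load
    let has_combine := if !has_combine && isCombineTok token then true else has_combine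
    let has_save := if !has_save && isSaveTok token then true else has_save
    if has_load && has_combine && has_save then (has_load, has_combine, has_save)
    else classifyLoop rest has_load has_combine has_save

def classify_media_nodes_py_alt (types : List String) : Bool × Bool × Bool :=
  classifyLoop types false false false

-- ===== PRECONDITION & SPEC =====
def Spec_classify_media_nodes_py (types : List String) (out : Bool × Bool × Bool) : Prop := out = classify_media_nodes_py_alt types
instance (types : List String) (out : Bool × Bool × Bool) : Decidable (Spec_classify_media_nodes_py types out) := by unfold Spec_classify_media_nodes_py; infer_instance

-- ===== CLAIM (what is proved, stated in full; the proofs are below) =====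
def Claim_equal_classify_media_nodes_py : Prop := ∀ (types : List String), Dom_classify_media_nodes_py types → Spec_classify_media_nodes_py types (classify_media_nodes_py types)

-- ===== LEMMAS AND PROOFS =====
theorem flag_eq (l b : Bool) : (if !l && b then true else l) = (l || b) := by
  cases l <;> cases b <;> rfl

theorem classifyLoop_eq (ts : List String) : ∀ l c s : Bool,
    classifyLoop ts l c s =
      (l || ts.any isLoadTok, c || ts.any isCombineTok, s || ts.any isSaveTok) := by
  induction ts with
  | nil => intro l c s; simp [classifyLoop]
  | cons t rest ih =>
    intro l c s
    simp only [classifyLoop, flag_eq, List.any_cons]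
    by_cases h : ((l || isLoadTok t) && (c || isCombineTok t) && (s || isSaveTok t)) = true
    · have h' := h
      rw [Bool.and_eq_true, Bool.and_eq_true] at h'
      obtain ⟨⟨hl, hc⟩, hs⟩ := h'
      simp only [Bool.or_eq_true] at hl hc hs
      simp only [h, if_true, Prod.mk.injEq]
      refine ⟨?_, ?_, ?_⟩
      · rcases hl with h1 | h1 <;> simp [h1]
      · rcases hc with h1 | h1 <;> simp [h1]
      · rcases hs with h1 | h1 <;> simp [h1]
    · simp only [h, if_false, Bool.false_eq_true, ih]
      simp [Bool.or_assoc]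

-- ===== VERDICT (by name: the statement is the Claim_ definition above) =====
theorem classify_media_nodes_py_spec : Claim_equal_classify_media_nodes_py := by
  intro types _
  unfold Spec_classify_media_nodes_py classify_media_nodes_py classify_media_nodes_py_alt
  simp [classifyLoop_eq]
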